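-- pv_equiv track=rewrite | github.com/asukhodko/dify-markdown-chunker | tests/integration/test_streaming_properties.py | _count_fence_markers
-- ===== SOURCE A (Python) =====
-- def _count_fence_markers(content: str) -> int:
--     """Count fence opening markers (```) in content."""
--     lines = content.split("\n")
--     count = 0
--     for line in lines:
--         stripped = line.strip()
--         if stripped.startswith("```") or stripped.startswith("~~~"):
--             count += 1
--     return count
-- ===== SOURCE B (Python) =====
-- def _count_fence_markers(content: str) -> int:
--     """Count fence opening markers in one pass over the characters, without splitting into lines."""
--     count = 0
--     at_start = True  # still inside the leading whitespace of the current line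
--     i = 0
--     n = len(content)
--     while i < n:
--         c = content[i]
--         if c == "\n":
--             at_start = True
--         elif at_start:
--             if c.isspace():
--                 pass  # still leading whitespace
--             else:
--                 if content[i:i + 3] in ("```", "~~~"):
--                     count += 1
--                 at_start = False
--         i += 1
--     return count
-- ===== Notes on version B (the rewrite author's own statement) =====
-- stated objective: alternative
-- what changed: Replaced split-into-lines + per-line strip/startswith with a single character-level pass that keeps a flag meaning the scan is still in the leading whitespace of the current line and tests a 3-char lookahead there, never materialising the lines.
import Mathlib
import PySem

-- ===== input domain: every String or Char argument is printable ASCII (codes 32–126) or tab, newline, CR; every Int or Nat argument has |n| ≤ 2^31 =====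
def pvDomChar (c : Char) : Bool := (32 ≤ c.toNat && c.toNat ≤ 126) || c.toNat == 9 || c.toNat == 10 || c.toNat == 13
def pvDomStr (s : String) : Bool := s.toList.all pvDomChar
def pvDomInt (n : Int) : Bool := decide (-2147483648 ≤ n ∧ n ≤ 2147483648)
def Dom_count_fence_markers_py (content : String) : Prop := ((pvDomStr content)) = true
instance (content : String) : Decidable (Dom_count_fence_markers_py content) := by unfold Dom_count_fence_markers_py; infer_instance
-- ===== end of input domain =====

set_option maxRecDepth 4096


-- B replaces the split-into-lines-then-strip loop by a single character-level pass
-- with a flag that records whether the scan is still in the leading whitespace of the current line (objective: alternative).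

-- ===== PORT A =====
-- loop body of A: strip the line, test the two fence prefixes
def lineHit (line : List Char) : Bool :=
  PySem.Chars.startswith (PySem.Chars.strip line) ['`', '`', '`'] ||
    PySem.Chars.startswith (PySem.Chars.strip line) ['~', '~', '~']

def count_fence_markers_py (content : String) : Int :=
  (PySem.Chars.splitOn content.toList ['\n']).foldl
    (fun count line => if lineHit line then count + 1 else count) 0

-- ===== PORT B =====
-- content[i:i+3] in ("```", "~~~")
def fenceAt (l : List Char) : Bool :=
  l.take 3 == ['`', '`', '`'] || l.take 3 == ['~', '~', '~']

def altLoop : List Char → Bool → Int → Int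
  | [], _, count => count
  | c :: rest, atStart, count =>
    if c = '\n' then altLoop rest true count
    else if atStart then
      if PySem.Chars.isspace c then altLoop rest true count
      else altLoop rest false (if fenceAt (c :: rest) then count + 1 else count)
    else altLoop rest false count

def count_fence_markers_py_alt (content : String) : Int :=
  altLoop content.toList true 0

-- ===== PRECONDITION & SPEC =====
def Spec_count_fence_markers_py (content : String) (out : Int) : Prop := out = count_fence_markers_py_alt content
instance (content : String) (out : Int) : Decidable (Spec_count_fence_markers_py content out) := by unfold Spec_count_fence_markers_py; infer_instance

-- ===== CLAIM (what is proved, stated in full; the proofs are below) =====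
def Claim_equal_count_fence_markers_py : Prop := ∀ (content : String), Dom_count_fence_markers_py content → Spec_count_fence_markers_py content (count_fence_markers_py content)

-- ===== LEMMAS AND PROOFS =====

-- reference line splitter: structural recursion with an accumulator for the current line
def mySplitAux (cur : List Char) : List Char → List (List Char)
  | [] => [cur.reverse]
  | c :: rest => if c = '\n' then cur.reverse :: mySplitAux [] rest else mySplitAux (c :: cur) rest

lemma go_spec (fuel : Nat) (l cur : List Char) (acc : List (List Char)) (h : l.length ≤ fuel) :
    PySem.Chars.splitOn.go ['\n'] fuel l cur acc = acc.reverse ++ mySplitAux cur l := by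
  induction fuel generalizing l cur acc with
  | zero =>
    have : l = [] := List.length_eq_zero_iff.mp (Nat.le_zero.mp h)
    subst this
    simp [PySem.Chars.splitOn.go, mySplitAux]
  | succ fuel ih =>
    cases l with
    | nil => simp [PySem.Chars.splitOn.go, mySplitAux]
    | cons c rest =>
      by_cases hc : c = '\n'
      · subst hc
        rw [PySem.Chars.splitOn.go]
        rw [if_pos (by simp [List.isPrefixOf])]
        simp only [List.length_cons, List.length_nil, List.drop_succ_cons, List.drop_zero]
        rw [ih rest [] _ (by simpa using h)]
        simp [mySplitAux]
      · rw [PySem.Chars.splitOn.go]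
        rw [if_neg (by simp [List.isPrefixOf]; intro h'; exact hc h'.symm)]
        rw [ih rest (c :: cur) acc (by simpa using h)]
        simp [mySplitAux, hc]

lemma splitOn_newline (cs : List Char) :
    PySem.Chars.splitOn cs ['\n'] = mySplitAux [] cs := by
  unfold PySem.Chars.splitOn
  rw [go_spec _ _ _ _ (by omega)]
  simp

lemma head_mySplitAux (cur cs : List Char) :
    mySplitAux cur cs = (cur.reverse ++ cs.takeWhile (· ≠ '\n')) :: (mySplitAux cur cs).tail := by
  induction cs generalizing cur with
  | nil => simp [mySplitAux]
  | cons c rest ih =>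
    by_cases hc : c = '\n'
    · subst hc; simp [mySplitAux]
    · rw [mySplitAux, if_neg hc, ih (c :: cur)]
      simp [hc]

-- the suffix rstrip removes never affects a prefix test against a whitespace-free pattern
lemma startswith_rstrip (l p : List Char) (hp : ∀ c ∈ p, PySem.Chars.isspace c = false) :
    PySem.Chars.startswith (PySem.Chars.rstrip l) p = PySem.Chars.startswith l p := by
  rw [Bool.eq_iff_iff, PySem.Chars.startswith_iff, PySem.Chars.startswith_iff]
  have hpre : PySem.Chars.rstrip l <+: l := by
    unfold PySem.Chars.rstrip
    have := List.dropWhile_suffix (l := l.reverse) (p := PySem.Chars.isspace)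
    have h2 := List.reverse_prefix.mpr this
    simpa using h2
  constructor
  · intro h; exact h.trans hpre
  · intro h
    have hdec : l = PySem.Chars.rstrip l ++ (l.reverse.takeWhile PySem.Chars.isspace).reverse := by
      unfold PySem.Chars.rstrip
      rw [← List.reverse_append, List.takeWhile_append_dropWhile, List.reverse_reverse]
    by_cases hlen : p.length ≤ (PySem.Chars.rstrip l).length
    · exact List.prefix_of_prefix_length_le h hpre hlen
    · exfalso
      have hrp : PySem.Chars.rstrip l <+: p := List.prefix_of_prefix_length_le hpre h (by omega)
      obtain ⟨p', hp'⟩ := hrp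
      have hp'ne : p' ≠ [] := by
        intro hn; rw [hn, List.append_nil] at hp'; rw [← hp'] at hlen; omega
      obtain ⟨t, ht⟩ := h
      rw [← hp', List.append_assoc] at ht
      have hs : (l.reverse.takeWhile PySem.Chars.isspace).reverse = p' ++ t :=
        List.append_cancel_left (hdec.symm.trans ht.symm)
      cases p' with
      | nil => exact hp'ne rfl
      | cons a p'' =>
        have ha_sp : PySem.Chars.isspace a = true := by
          have : a ∈ (l.reverse.takeWhile PySem.Chars.isspace).reverse := by rw [hs]; simp
          exact List.mem_takeWhile_imp (List.mem_reverse.mp this)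
        have ha_ns : PySem.Chars.isspace a = false := hp a (by rw [← hp']; simp)
        rw [ha_sp] at ha_ns; simp at ha_ns

lemma lineHit_all_space (cur : List Char) (h : ∀ c ∈ cur, PySem.Chars.isspace c = true) :
    lineHit cur = false := by
  have hl : PySem.Chars.lstrip cur = [] := by
    unfold PySem.Chars.lstrip
    exact List.dropWhile_eq_nil_iff.mpr h
  unfold lineHit PySem.Chars.strip
  rw [hl]
  simp [PySem.Chars.rstrip, PySem.Chars.startswith]

lemma take_beq_takeWhile (x p : List Char) (hp : ∀ ch ∈ p, ch ≠ '\n') :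
    ((x.takeWhile (· ≠ '\n')).take p.length == p) = (x.take p.length == p) := by
  induction x generalizing p with
  | nil => rfl
  | cons a x' ih =>
    by_cases ha : a = '\n'
    · subst ha
      cases p with
      | nil => simp
      | cons q p' =>
        have : ('\n' : Char) ≠ q := fun h => hp q (by simp) h.symm
        simp [List.take_succ_cons, this]
    · cases p with
      | nil => simp
      | cons q p' =>
        simp only [List.takeWhile_cons]
        rw [if_pos (show (decide (a ≠ '\n')) = true by simp [ha])]
        simp only [List.length_cons, List.take_succ_cons, List.cons_beq_cons]
        rw [ih p' (fun ch hch => hp ch (by simp [hch]))]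

lemma startswith_eq_take (x p : List Char) :
    PySem.Chars.startswith x p = (x.take p.length == p) := by
  rw [Bool.eq_iff_iff]
  unfold PySem.Chars.startswith
  rw [List.isPrefixOf_iff_prefix, beq_iff_eq, List.prefix_iff_eq_take]
  exact ⟨fun h => h.symm, fun h => h.symm⟩

lemma fenceAt_takeWhile (c : Char) (rest : List Char) :
    fenceAt (c :: rest.takeWhile (· ≠ '\n')) = fenceAt (c :: rest) := by
  unfold fenceAt
  simp only [List.take_succ_cons, List.cons_beq_cons]
  have h1 : (List.take 2 (rest.takeWhile (· ≠ '\n')) == ['`', '`']) = (List.take 2 rest == ['`', '`']) :=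
    take_beq_takeWhile rest ['`', '`'] (by intro x hx; fin_cases hx <;> decide)
  have h2 : (List.take 2 (rest.takeWhile (· ≠ '\n')) == ['~', '~']) = (List.take 2 rest == ['~', '~']) :=
    take_beq_takeWhile rest ['~', '~'] (by intro x hx; fin_cases hx <;> decide)
  rw [h1, h2]

lemma lineHit_line (cur : List Char) (c : Char) (rest : List Char)
    (hcur : ∀ x ∈ cur, PySem.Chars.isspace x = true) (hc : PySem.Chars.isspace c = false) :
    lineHit (cur.reverse ++ c :: rest.takeWhile (· ≠ '\n')) = fenceAt (c :: rest) := by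
  have hl : PySem.Chars.lstrip (cur.reverse ++ c :: rest.takeWhile (· ≠ '\n')) = c :: rest.takeWhile (· ≠ '\n') := by
    unfold PySem.Chars.lstrip
    rw [List.dropWhile_append]
    have : List.dropWhile PySem.Chars.isspace cur.reverse = [] :=
      List.dropWhile_eq_nil_iff.mpr (fun x hx => hcur x (List.mem_reverse.mp hx))
    rw [this]
    simp [hc]
  unfold lineHit PySem.Chars.strip
  rw [hl]
  rw [startswith_rstrip _ _ (by intro x hx; fin_cases hx <;> decide), startswith_rstrip _ _ (by intro x hx; fin_cases hx <;> decide)]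
  rw [← fenceAt_takeWhile]
  rw [startswith_eq_take, startswith_eq_take]
  rfl

def foldA (k : Int) (lines : List (List Char)) : Int :=
  lines.foldl (fun count line => if lineHit line then count + 1 else count) k

lemma main_lemma (cs : List Char) :
    (∀ cur (k : Int), (∀ x ∈ cur, PySem.Chars.isspace x = true) →
        altLoop cs true k = foldA k (mySplitAux cur cs)) ∧
    (∀ cur (k : Int), altLoop cs false k = foldA k (mySplitAux cur cs).tail) := by
  induction cs with
  | nil =>
    refine ⟨fun cur k hcur => ?_, fun cur k => ?_⟩
    · simp [altLoop, mySplitAux, foldA, List.foldl, lineHit_all_space cur.reverse (by simpa using hcur)]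
    · simp [altLoop, mySplitAux, foldA]
  | cons c rest ih =>
    obtain ⟨ih1, ih2⟩ := ih
    refine ⟨fun cur k hcur => ?_, fun cur k => ?_⟩
    · by_cases hc : c = '\n'
      · subst hc
        rw [mySplitAux, if_pos rfl]
        show altLoop ('\n' :: rest) true k = foldA k _
        rw [altLoop, if_pos rfl]
        unfold foldA
        rw [List.foldl_cons, if_neg (by simp [lineHit_all_space cur.reverse (by simpa using hcur)])]
        exact ih1 [] k (by simp)
      · by_cases hsp : PySem.Chars.isspace c = true
        · rw [mySplitAux, if_neg hc]
          show altLoop (c :: rest) true k = _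
          rw [altLoop, if_neg hc, if_pos rfl, if_pos hsp]
          exact ih1 (c :: cur) k (by
            intro x hx
            rcases List.mem_cons.mp hx with h | h
            · subst h; exact hsp
            · exact hcur x h)
        · rw [mySplitAux, if_neg hc]
          show altLoop (c :: rest) true k = _
          rw [altLoop, if_neg hc, if_pos rfl, if_neg hsp]
          rw [head_mySplitAux (c :: cur) rest]
          unfold foldA
          rw [List.foldl_cons]
          have hline : lineHit ((c :: cur).reverse ++ rest.takeWhile (· ≠ '\n')) = fenceAt (c :: rest) := by
            have := lineHit_line cur c rest hcur (Bool.not_eq_true _ ▸ hsp)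
            simpa using this
          rw [hline]
          exact ih2 (c :: cur) _
    · by_cases hc : c = '\n'
      · subst hc
        rw [mySplitAux, if_pos rfl]
        show altLoop ('\n' :: rest) false k = _
        rw [altLoop, if_pos rfl]
        simp only [List.tail_cons]
        exact ih1 [] k (by simp)
      · rw [mySplitAux, if_neg hc]
        show altLoop (c :: rest) false k = _
        rw [altLoop, if_neg hc]
        simp only [Bool.false_eq_true, if_false]
        exact ih2 (c :: cur) k

-- ===== VERDICT (by name: the statement is the Claim_ definition above) =====
theorem count_fence_markers_py_spec : Claim_equal_count_fence_markers_py := by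
  intro content _
  unfold Spec_count_fence_markers_py count_fence_markers_py count_fence_markers_py_alt
  rw [splitOn_newline]
  exact ((main_lemma content.toList).1 [] 0 (by simp)).symm
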